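-- pv_equiv track=rewrite | github.com/imrul18/ThesisWebsite | function.py | bloodsugercount
-- ===== SOURCE A (Python) =====
-- def bloodsugercount(dataset):
--     count = [0, 0]
--     for x in range(1, len(dataset)):
--         if dataset[x][-1] == 1:
--             if dataset[x][5] == 0:
--                 count[0] += 1
--             else:
--                 count[1] += 1
--     return count
-- ===== SOURCE B (Python) =====
-- def bloodsugercount(dataset):
--     return _split_count(dataset[1:])
--
-- def _split_count(rows):
--     # divide and conquer: count each half, merge the pairs
--     if len(rows) == 0:
--         return [0, 0]
--     if len(rows) == 1:
--         row = rows[0]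
--         if row[-1] == 1:
--             return [1, 0] if row[5] == 0 else [0, 1]
--         return [0, 0]
--     m = len(rows) // 2
--     left = _split_count(rows[:m])
--     right = _split_count(rows[m:])
--     return [left[0] + right[0], left[1] + right[1]]
-- ===== Notes on version B (the rewrite author's own statement) =====
-- stated objective: alternative
-- what changed: Replaces A's single indexed pass with two inline counters by a divide-and-conquer recursion: the row list is split in half, each half counted recursively, and the two count pairs merged by addition.
import Mathlib
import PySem

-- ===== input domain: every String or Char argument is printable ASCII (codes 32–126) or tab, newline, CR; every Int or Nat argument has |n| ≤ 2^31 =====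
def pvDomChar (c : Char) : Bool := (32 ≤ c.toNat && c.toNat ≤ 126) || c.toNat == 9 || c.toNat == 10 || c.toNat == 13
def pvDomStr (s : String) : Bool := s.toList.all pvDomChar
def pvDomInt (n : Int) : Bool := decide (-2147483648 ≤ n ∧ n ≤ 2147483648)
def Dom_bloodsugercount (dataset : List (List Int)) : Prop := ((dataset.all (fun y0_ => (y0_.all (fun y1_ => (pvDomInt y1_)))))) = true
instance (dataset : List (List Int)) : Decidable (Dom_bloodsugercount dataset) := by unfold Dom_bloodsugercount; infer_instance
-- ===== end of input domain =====

-- B replaces A's single indexed pass with two inline counters by a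
-- divide-and-conquer recursion that splits the rows in half and merges count pairs.

-- ===== PORT A =====
-- literal port of A's index loop; pyGetD defaults are only reached outside Pre_
def bloodsugercount (dataset : List (List Int)) : List Int :=
  (PySem.List.pyRange 1 (dataset.length : Int) 1).foldl
    (fun count x =>
      let row := PySem.List.pyGetD dataset x []
      if PySem.List.pyGetD row (-1) 0 = 1 then
        if PySem.List.pyGetD row 5 0 = 0 then
          [PySem.List.pyGetD count 0 0 + 1, PySem.List.pyGetD count 1 0]
        else
          [PySem.List.pyGetD count 0 0, PySem.List.pyGetD count 1 0 + 1]
      else count)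
    [0, 0]

-- ===== PORT B =====
-- [left[0]+right[0], left[1]+right[1]]
def bscMerge (l r : List Int) : List Int :=
  [PySem.List.pyGetD l 0 0 + PySem.List.pyGetD r 0 0,
   PySem.List.pyGetD l 1 0 + PySem.List.pyGetD r 1 0]

-- _split_count: divide and conquer; 'len(rows) // 2' is Nat division (length ≥ 0, exact)
def bscSplitCount (rows : List (List Int)) : List Int :=
  if rows.length = 0 then [0, 0]
  else if rows.length = 1 then
    let row := PySem.List.pyGetD rows 0 []
    if PySem.List.pyGetD row (-1) 0 = 1 then
      if PySem.List.pyGetD row 5 0 = 0 then [1, 0] else [0, 1]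
    else [0, 0]
  else
    -- m = len(rows) // 2, written inline at both slice sites
    bscMerge (bscSplitCount (PySem.List.slice rows none (some ((rows.length / 2 : Nat) : Int))))
             (bscSplitCount (PySem.List.slice rows (some ((rows.length / 2 : Nat) : Int)) none))
termination_by rows.length
decreasing_by
  · rw [PySem.List.slice_to_natCast]; simp only [List.length_take]; omega
  · rw [PySem.List.slice_from_natCast]; simp only [List.length_drop]; omega

def bloodsugercount_alt (dataset : List (List Int)) : List Int :=
  bscSplitCount (PySem.List.slice dataset (some 1) none)

-- ===== PRECONDITION & SPEC =====
-- Pre_ excludes exactly the inputs on which the Python A raises IndexError: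
-- a row after the header that is empty, or a label-1 row with fewer than 6 columns.
def Pre_bloodsugercount (dataset : List (List Int)) : Prop :=
  ∀ row ∈ dataset.tail, row ≠ [] ∧ (row.getLast? = some 1 → 6 ≤ row.length)
instance (dataset : List (List Int)) : Decidable (Pre_bloodsugercount dataset) := by
  unfold Pre_bloodsugercount; infer_instance

def pvWitness_bloodsugercount : List (List Int) :=
  [[7], [0, 0, 0, 0, 0, 0, 1], [9, 9, 9, 9, 9, 3, 1], [2, 2]]

def Spec_bloodsugercount (dataset : List (List Int)) (out : List Int) : Prop := out = bloodsugercount_alt dataset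
instance (dataset : List (List Int)) (out : List Int) : Decidable (Spec_bloodsugercount dataset out) := by unfold Spec_bloodsugercount; infer_instance

-- ===== CLAIM (what is proved, stated in full; the proofs are below) =====
def Claim_equal_bloodsugercount : Prop := ∀ (dataset : List (List Int)), Dom_bloodsugercount dataset → Pre_bloodsugercount dataset → Spec_bloodsugercount dataset (bloodsugercount dataset)

-- ===== LEMMAS AND PROOFS =====

-- classification predicates used only to state the common value of both ports
def bscP0 (row : List Int) : Bool :=
  PySem.List.pyGetD row (-1) 0 == 1 && PySem.List.pyGetD row 5 0 == 0
def bscP1 (row : List Int) : Bool :=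
  PySem.List.pyGetD row (-1) 0 == 1 && !(PySem.List.pyGetD row 5 0 == 0)

-- the divide-and-conquer recursion computes the two class counts
theorem bscSplitCount_eq (n : Nat) (rows : List (List Int)) (hn : rows.length ≤ n) :
    bscSplitCount rows = [((rows.countP bscP0 : Nat) : Int), ((rows.countP bscP1 : Nat) : Int)] := by
  induction n generalizing rows with
  | zero =>
    have : rows = [] := List.length_eq_zero_iff.mp (Nat.le_zero.mp hn)
    subst this; rw [bscSplitCount]; simp
  | succ n ih =>
    rw [bscSplitCount]
    by_cases h0 : rows.length = 0
    · rw [if_pos h0]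
      have : rows = [] := List.length_eq_zero_iff.mp h0
      subst this; simp
    · rw [if_neg h0]
      by_cases h1 : rows.length = 1
      · rw [if_pos h1]
        obtain ⟨row, rfl⟩ := List.length_eq_one_iff.mp h1
        have hget : PySem.List.pyGetD [row] 0 ([] : List Int) = row := rfl
        rw [hget]
        by_cases ha : PySem.List.pyGetD row (-1) 0 = 1
        · by_cases hb : PySem.List.pyGetD row 5 0 = 0
          · simp [ha, hb, bscP0, bscP1]
          · simp [ha, hb, bscP0, bscP1]
        · simp [ha, bscP0, bscP1]
      · rw [if_neg h1]
        have hlen : 2 ≤ rows.length := by omega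
        rw [PySem.List.slice_to_natCast, PySem.List.slice_from_natCast]
        have hl : (rows.take (rows.length / 2)).length ≤ n := by
          simp; omega
        have hr : (rows.drop (rows.length / 2)).length ≤ n := by
          simp; omega
        rw [ih _ hl, ih _ hr]
        have hc0 : rows.countP bscP0
            = (rows.take (rows.length / 2)).countP bscP0 + (rows.drop (rows.length / 2)).countP bscP0 := by
          conv_lhs => rw [← List.take_append_drop (rows.length / 2) rows]
          rw [List.countP_append]
        have hc1 : rows.countP bscP1
            = (rows.take (rows.length / 2)).countP bscP1 + (rows.drop (rows.length / 2)).countP bscP1 := by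
          conv_lhs => rw [← List.take_append_drop (rows.length / 2) rows]
          rw [List.countP_append]
        simp [PySem.List.pyGetD, PySem.List.pyIdx?, PySem.List.pyGet?, hc0, hc1]
        constructor <;> push_cast <;> ring

-- A's fold over the tail rows adds exactly the two class counts
theorem bsc_fold_eq (l : List (List Int)) (c0 c1 : Int) :
    l.foldl
      (fun count row =>
        if PySem.List.pyGetD row (-1) 0 = 1 then
          if PySem.List.pyGetD row 5 0 = 0 then
            [PySem.List.pyGetD count 0 0 + 1, PySem.List.pyGetD count 1 0]
          else
            [PySem.List.pyGetD count 0 0, PySem.List.pyGetD count 1 0 + 1]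
        else count)
      [c0, c1]
    = [c0 + ((l.countP bscP0 : Nat) : Int), c1 + ((l.countP bscP1 : Nat) : Int)] := by
  induction l generalizing c0 c1 with
  | nil => simp
  | cons row rest ih =>
    simp only [List.foldl_cons]
    by_cases ha : PySem.List.pyGetD row (-1) 0 = 1
    · by_cases hb : PySem.List.pyGetD row 5 0 = 0
      · rw [if_pos ha, if_pos hb,
            show PySem.List.pyGetD [c0, c1] 0 0 = c0 from rfl,
            show PySem.List.pyGetD [c0, c1] 1 0 = c1 from rfl, ih]
        simp [List.countP_cons, bscP0, bscP1, ha, hb]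
        omega
      · rw [if_pos ha, if_neg hb,
            show PySem.List.pyGetD [c0, c1] 0 0 = c0 from rfl,
            show PySem.List.pyGetD [c0, c1] 1 0 = c1 from rfl, ih]
        simp [List.countP_cons, bscP0, bscP1, ha, hb]
        omega
    · rw [if_neg ha, ih]
      simp [List.countP_cons, bscP0, bscP1, ha]

-- ===== VERDICT (by name: the statement is the Claim_ definition above) =====
theorem bloodsugercount_spec : Claim_equal_bloodsugercount := by
  unfold Claim_equal_bloodsugercount
  intro dataset _ _
  unfold Spec_bloodsugercount bloodsugercount bloodsugercount_alt
  rw [PySem.List.slice_from_one,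
      bscSplitCount_eq dataset.tail.length dataset.tail (le_refl _)]
  rw [show ((dataset.length : Int)) = ((dataset.length : Nat) : Int) from rfl,
      PySem.List.foldl_pyRange_pyGetD' (a := 1) dataset
        (f := fun count row =>
          if PySem.List.pyGetD row (-1) 0 = 1 then
            if PySem.List.pyGetD row 5 0 = 0 then
              [PySem.List.pyGetD count 0 0 + 1, PySem.List.pyGetD count 1 0]
            else
              [PySem.List.pyGetD count 0 0, PySem.List.pyGetD count 1 0 + 1]
          else count)
        (d := []) (init := [0, 0]) (by omega)]
  have := bsc_fold_eq (dataset.drop 1) 0 0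
  simp only [Int.toNat_one] at this ⊢
  rw [this]
  simp [List.drop_one]
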